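-- pv_equiv track=rewrite | github.com/philipdaubmeier/pixelpast-core | src/pixelpast/ingestion/lightroom_catalog/transform.py | _prune_redundant_suffix_paths
-- ===== SOURCE A (Python) =====
-- _HIERARCHY_SEPARATOR = "|"
--
-- def _prune_redundant_suffix_paths(paths: tuple[str, ...]) -> tuple[str, ...]:
--     pruned_paths: list[str] = []
--     for path in paths:
--         path_segments = path.split(_HIERARCHY_SEPARATOR)
--         if any(
--             other != path
--             and len(other.split(_HIERARCHY_SEPARATOR)) > len(path_segments)
--             and other.split(_HIERARCHY_SEPARATOR)[-len(path_segments) :] == path_segments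
--             for other in paths
--         ):
--             continue
--         pruned_paths.append(path)
--     return tuple(pruned_paths)
-- ===== SOURCE B (Python) =====
-- _HIERARCHY_SEPARATOR = "|"
--
-- def _prune_redundant_suffix_paths(paths: tuple[str, ...]) -> tuple[str, ...]:
--     # One pass builds the set of all proper segment-suffixes; a second pass keeps
--     # every path whose segment list is not such a suffix of some path.
--     seg_lists = [tuple(p.split(_HIERARCHY_SEPARATOR)) for p in paths]
--     suffixes = set()
--     for segs in seg_lists:
--         for j in range(1, len(segs)):
--             suffixes.add(segs[j:])
--     return tuple(p for p, segs in zip(paths, seg_lists) if segs not in suffixes)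
-- ===== Notes on version B (the rewrite author's own statement) =====
-- stated objective: faster
-- what changed: Instead of testing every path against every other path (quadratic all-pairs suffix comparison), B makes one pass collecting every proper segment-suffix of every path into a set, then keeps exactly the paths whose segment tuple is not in that set.
import Mathlib
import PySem

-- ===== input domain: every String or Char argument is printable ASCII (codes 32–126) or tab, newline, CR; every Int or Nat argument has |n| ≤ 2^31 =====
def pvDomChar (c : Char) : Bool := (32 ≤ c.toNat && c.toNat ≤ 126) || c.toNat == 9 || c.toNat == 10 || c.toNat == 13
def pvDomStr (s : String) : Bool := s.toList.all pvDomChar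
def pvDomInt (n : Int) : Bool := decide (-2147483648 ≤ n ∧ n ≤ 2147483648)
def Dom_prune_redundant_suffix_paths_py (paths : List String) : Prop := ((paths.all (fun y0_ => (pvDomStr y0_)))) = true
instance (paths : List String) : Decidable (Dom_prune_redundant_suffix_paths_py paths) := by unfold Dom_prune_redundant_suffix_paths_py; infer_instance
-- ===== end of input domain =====

-- B replaces A's quadratic all-pairs suffix test by one pass that collects every
-- proper segment-suffix into a set and a second pass that filters against it (faster, asymptotic).

-- shared primitive: path.split("|") (separator is the nonempty literal "|", so split? is always some)
def pySplitPipe (s : String) : List String := (PySem.Str.split? s "|").getD []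

-- ===== PORT A =====
def prune_redundant_suffix_paths_py (paths : List String) : List String :=
  paths.foldl (fun pruned_paths path =>
    let path_segments := pySplitPipe path
    if paths.any (fun other =>
        other != path
        && decide ((pySplitPipe other).length > path_segments.length)
        && decide (PySem.List.slice (pySplitPipe other) (some (-(path_segments.length : Int))) none = path_segments))
    then pruned_paths
    else pruned_paths ++ [path]) []

-- ===== PORT B =====
def prune_redundant_suffix_paths_py_alt (paths : List String) : List String :=
  let seg_lists := paths.map (fun p => pySplitPipe p)
  let suffixes : PySem.Set (List String) := seg_lists.foldl (fun s segs =>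
      (PySem.List.pyRange 1 segs.length 1).foldl
        (fun s j => PySem.Set.add s (PySem.List.slice segs (some j) none)) s)
    PySem.Set.empty
  ((paths.zip seg_lists).filter (fun ps => !(PySem.Set.contains suffixes ps.2))).map Prod.fst

-- ===== PRECONDITION & SPEC =====
def Spec_prune_redundant_suffix_paths_py (paths : List String) (out : List String) : Prop := out = prune_redundant_suffix_paths_py_alt paths
instance (paths : List String) (out : List String) : Decidable (Spec_prune_redundant_suffix_paths_py paths out) := by unfold Spec_prune_redundant_suffix_paths_py; infer_instance

-- ===== CLAIM (what is proved, stated in full; the proofs are below) =====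
def Claim_equal_prune_redundant_suffix_paths_py : Prop := ∀ (paths : List String), Dom_prune_redundant_suffix_paths_py paths → Spec_prune_redundant_suffix_paths_py paths (prune_redundant_suffix_paths_py paths)

-- ===== LEMMAS AND PROOFS =====

-- membership in a fold of Set.add's
theorem mem_foldl_set_add {α β : Type} [BEq α] [LawfulBEq α] (l : List β) (f : β → α)
    (s : PySem.Set α) (x : α) :
    x ∈ l.foldl (fun s b => PySem.Set.add s (f b)) s ↔ x ∈ s ∨ ∃ b ∈ l, f b = x := by
  induction l generalizing s with
  | nil => simp
  | cons b l ih =>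
    simp only [List.foldl_cons, ih, PySem.Set.mem_add, List.mem_cons]
    constructor
    · rintro (⟨h | h⟩ | ⟨c, hc, hfc⟩)
      · exact Or.inl h
      · exact Or.inr ⟨b, Or.inl rfl, h.symm⟩
      · exact Or.inr ⟨c, Or.inr hc, hfc⟩
    · rintro (h | ⟨c, (rfl | hc), hfc⟩)
      · exact Or.inl (Or.inl h)
      · exact Or.inl (Or.inr hfc.symm)
      · exact Or.inr ⟨c, hc, hfc⟩

-- B's suffix set contains exactly the proper segment-suffixes of paths
theorem mem_suffixSet (paths : List String) (x : List String) :
    x ∈ ((paths.map (fun p => pySplitPipe p)).foldl (fun s segs =>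
          (PySem.List.pyRange 1 segs.length 1).foldl
            (fun s j => PySem.Set.add s (PySem.List.slice segs (some j) none)) s)
        PySem.Set.empty)
    ↔ ∃ o ∈ paths, ∃ j : Nat, 1 ≤ j ∧ j < (pySplitPipe o).length ∧ (pySplitPipe o).drop j = x := by
  have inner : ∀ (segs : List String) (s : PySem.Set (List String)),
      x ∈ (PySem.List.pyRange 1 segs.length 1).foldl
            (fun s j => PySem.Set.add s (PySem.List.slice segs (some j) none)) s
      ↔ x ∈ s ∨ ∃ j : Nat, 1 ≤ j ∧ j < segs.length ∧ segs.drop j = x := by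
    intro segs s
    rw [mem_foldl_set_add]
    constructor
    · rintro (h | ⟨j, hj, hx⟩)
      · exact Or.inl h
      · rw [PySem.List.mem_pyRange_one] at hj
        refine Or.inr ⟨j.toNat, by omega, by omega, ?_⟩
        rw [← PySem.List.slice_from segs (by omega : (0:Int) ≤ j)]; exact hx
    · rintro (h | ⟨j, hj1, hj2, hx⟩)
      · exact Or.inl h
      · refine Or.inr ⟨(j : Int), ?_, ?_⟩
        · rw [PySem.List.mem_pyRange_one]; omega
        · rw [PySem.List.slice_from segs (by omega : (0:Int) ≤ (j:Int))]
          simpa using hx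
  have step : ∀ (l : List String) (s : PySem.Set (List String)),
      x ∈ (l.map (fun p => pySplitPipe p)).foldl (fun s segs =>
            (PySem.List.pyRange 1 segs.length 1).foldl
              (fun s j => PySem.Set.add s (PySem.List.slice segs (some j) none)) s) s
      ↔ x ∈ s ∨ ∃ o ∈ l, ∃ j : Nat, 1 ≤ j ∧ j < (pySplitPipe o).length ∧ (pySplitPipe o).drop j = x := by
    intro l
    induction l with
    | nil => simp
    | cons q qs ihq =>
      intro s
      simp only [List.map_cons, List.foldl_cons]
      rw [ihq, inner]
      simp only [List.mem_cons]
      constructor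
      · rintro (⟨h | h⟩ | h)
        · exact Or.inl h
        · obtain ⟨j, hj⟩ := h; exact Or.inr ⟨q, Or.inl rfl, j, hj⟩
        · obtain ⟨o, ho, hj⟩ := h; exact Or.inr ⟨o, Or.inr ho, hj⟩
      · rintro (h | ⟨o, (rfl | ho), hj⟩)
        · exact Or.inl (Or.inl h)
        · exact Or.inl (Or.inr hj)
        · exact Or.inr ⟨o, ho, hj⟩
  rw [step]
  simp [PySem.Set.empty]

-- A's inner `any` holds exactly when path's segment list is a proper segment-suffix of some element
theorem anyA_iff (paths : List String) (path : String) :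
    (paths.any (fun other =>
        other != path
        && decide ((pySplitPipe other).length > (pySplitPipe path).length)
        && decide (PySem.List.slice (pySplitPipe other) (some (-((pySplitPipe path).length : Int))) none = pySplitPipe path))) = true
    ↔ ∃ o ∈ paths, ∃ j : Nat, 1 ≤ j ∧ j < (pySplitPipe o).length ∧ (pySplitPipe o).drop j = pySplitPipe path := by
  rw [List.any_eq_true]
  constructor
  · rintro ⟨o, ho, hb⟩
    simp only [Bool.and_eq_true, bne_iff_ne, decide_eq_true_eq, gt_iff_lt] at hb
    obtain ⟨⟨hne, hlen⟩, hsl⟩ := hb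
    by_cases hk : (pySplitPipe path).length = 0
    · -- k = 0: slice from -0 is the whole list, forcing equal lengths, contradiction
      simp only [hk, Nat.cast_zero, neg_zero] at hsl hlen
      rw [PySem.List.slice_zero_start, PySem.List.slice_none_none] at hsl
      rw [hsl] at hlen; omega
    · refine ⟨o, ho, (pySplitPipe o).length - (pySplitPipe path).length, by omega, by omega, ?_⟩
      rw [PySem.List.slice_from_neg_natCast (pySplitPipe o) (pySplitPipe path).length (by omega)] at hsl
      exact hsl
  · rintro ⟨o, ho, j, hj1, hj2, hdrop⟩
    refine ⟨o, ho, ?_⟩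
    have hklen : (pySplitPipe path).length = (pySplitPipe o).length - j := by
      rw [← hdrop]; simp
    have hkpos : 0 < (pySplitPipe path).length := by omega
    have hne : o ≠ path := by
      intro h; rw [h] at hklen; omega
    simp only [Bool.and_eq_true, bne_iff_ne, decide_eq_true_eq, gt_iff_lt]
    refine ⟨⟨hne, by omega⟩, ?_⟩
    rw [PySem.List.slice_from_neg_natCast (pySplitPipe o) (pySplitPipe path).length hkpos]
    have : (pySplitPipe o).length - (pySplitPipe path).length = j := by omega
    rw [this, hdrop]

-- ===== VERDICT (by name: the statement is the Claim_ definition above) =====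
theorem prune_redundant_suffix_paths_py_spec : Claim_equal_prune_redundant_suffix_paths_py := by
  intro paths _
  unfold Spec_prune_redundant_suffix_paths_py
  unfold prune_redundant_suffix_paths_py prune_redundant_suffix_paths_py_alt
  simp only []
  -- A's fold is a filter
  have hA : (paths.foldl (fun pruned_paths path =>
      if paths.any (fun other =>
          other != path
          && decide ((pySplitPipe other).length > (pySplitPipe path).length)
          && decide (PySem.List.slice (pySplitPipe other) (some (-((pySplitPipe path).length : Int))) none = pySplitPipe path))
      then pruned_paths else pruned_paths ++ [path]) [])
      = paths.filter (fun path => !(paths.any (fun other =>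
          other != path
          && decide ((pySplitPipe other).length > (pySplitPipe path).length)
          && decide (PySem.List.slice (pySplitPipe other) (some (-((pySplitPipe path).length : Int))) none = pySplitPipe path)))) := by
    have hf : (fun (pruned_paths : List String) (path : String) =>
        if paths.any (fun other =>
            other != path
            && decide ((pySplitPipe other).length > (pySplitPipe path).length)
            && decide (PySem.List.slice (pySplitPipe other) (some (-((pySplitPipe path).length : Int))) none = pySplitPipe path))
        then pruned_paths else pruned_paths ++ [path])
        = (fun (pruned_paths : List String) (path : String) =>
        if (!(paths.any (fun other =>
            other != path
            && decide ((pySplitPipe other).length > (pySplitPipe path).length)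
            && decide (PySem.List.slice (pySplitPipe other) (some (-((pySplitPipe path).length : Int))) none = pySplitPipe path)))) = true
        then pruned_paths ++ [(fun x => x) path] else pruned_paths) := by
      funext acc x
      by_cases h : (paths.any (fun other =>
            other != x
            && decide ((pySplitPipe other).length > (pySplitPipe x).length)
            && decide (PySem.List.slice (pySplitPipe other) (some (-((pySplitPipe x).length : Int))) none = pySplitPipe x))) = true
      · simp [h]
      · simp [h]
    rw [hf, PySem.List.foldl_append_if]
    simp
  rw [hA]
  -- B is a filter too
  have hzip : ∀ (l : List String), l.zip (l.map (fun p => pySplitPipe p))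
      = l.map (fun p => (p, pySplitPipe p)) := by
    intro l; induction l with
    | nil => rfl
    | cons a t ih => simp [ih]
  rw [hzip paths, List.filter_map, List.map_map]
  simp only [Function.comp_def]
  simp only [List.map_id']
  -- pointwise: the two filter predicates agree
  apply List.filter_congr
  intro x hx
  have := anyA_iff paths x
  have hmem := mem_suffixSet paths (pySplitPipe x)
  rw [← hmem] at this
  congr 1
  rw [Bool.eq_iff_iff, this, ← PySem.Set.contains_iff]
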